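-- pv_equiv track=rewrite | github.com/salonxix/Python_100-days-streak | find_min_area_to_cover_all_ones_II.py | minSumRectangles
-- ===== SOURCE A (Python) =====
-- from collections import deque
--
-- def minSumRectangles(grid):
--     m, n = len(grid), len(grid[0])
--     visited = [[False]*n for _ in range(m)]
--
--     def bfs(x, y):
--         q = deque([(x, y)])
--         visited[x][y] = True
--         min_r, max_r, min_c, max_c = x, x, y, y
--
--         while q:
--             r, c = q.popleft()
--             for dr, dc in [(1,0), (-1,0), (0,1), (0,-1)]:
--                 nr, nc = r+dr, c+dc
--                 if 0 <= nr < m and 0 <= nc < n and not visited[nr][nc] and grid[nr][nc] == 1: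
--                     visited[nr][nc] = True
--                     q.append((nr, nc))
--                     min_r, max_r = min(min_r, nr), max(max_r, nr)
--                     min_c, max_c = min(min_c, nc), max(max_c, nc)
--         return (max_r-min_r+1) * (max_c-min_c+1)
--
--     total_area = 0
--     for i in range(m):
--         for j in range(n):
--             if grid[i][j] == 1 and not visited[i][j]:
--                 total_area += bfs(i, j)
--
--     return total_area
-- ===== SOURCE B (Python) =====
-- def minSumRectangles(grid):
--     m, n = len(grid), len(grid[0])
--     # label-propagation merge: each 1-cell starts as its own label; for every
--     # right/down adjacency merge the two classes by rewriting one label.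
--     label = {}
--     for i in range(m):
--         for j in range(n):
--             if grid[i][j] == 1:
--                 label[(i, j)] = (i, j)
--     for i in range(m):
--         for j in range(n):
--             if (i, j) in label:
--                 for t in ((i + 1, j), (i, j + 1)):
--                     if t in label and label[t] != label[(i, j)]:
--                         old, new = label[t], label[(i, j)]
--                         for p in label:
--                             if label[p] == old:
--                                 label[p] = new
--     boxes = {}
--     for (i, j), r in label.items():
--         if r in boxes:
--             b = boxes[r]
--             boxes[r] = (min(b[0], i), max(b[1], i), min(b[2], j), max(b[3], j))
--         else:
--             boxes[r] = (i, i, j, j)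
--     return sum((b[1] - b[0] + 1) * (b[3] - b[2] + 1) for b in boxes.values())
-- ===== Notes on version B (the rewrite author's own statement) =====
-- stated objective: alternative
-- what changed: Replaces the per-component BFS flood fill (deque + visited matrix) by a union-by-relabelling pass over the right/down adjacencies followed by one grouping pass that folds each cell into its root's bounding box.
import Mathlib
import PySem

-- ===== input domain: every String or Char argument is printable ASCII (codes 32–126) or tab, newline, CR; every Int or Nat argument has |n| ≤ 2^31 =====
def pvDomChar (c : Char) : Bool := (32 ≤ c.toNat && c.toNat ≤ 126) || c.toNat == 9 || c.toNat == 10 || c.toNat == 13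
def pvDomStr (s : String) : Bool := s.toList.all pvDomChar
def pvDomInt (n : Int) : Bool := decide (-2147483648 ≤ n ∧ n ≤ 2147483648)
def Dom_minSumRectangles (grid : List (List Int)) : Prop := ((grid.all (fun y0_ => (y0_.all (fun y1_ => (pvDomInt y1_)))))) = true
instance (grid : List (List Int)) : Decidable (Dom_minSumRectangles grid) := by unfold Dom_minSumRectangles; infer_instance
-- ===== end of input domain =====

-- B replaces A's per-component BFS flood fill by label-propagation merging (union
-- right/down adjacencies by rewriting labels) followed by one grouping pass over the
-- labels; objective: alternative algorithm, not claimed faster.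

-- ===== PORT A =====

-- grid[r][c]; only used under the checks 0 ≤ r < m, 0 ≤ c < n of the Python
def pvAt (grid : List (List Int)) (r c : Int) : Int :=
  (grid.getD r.toNat []).getD c.toNat 0

def pvDirs : List (Int × Int) := [(1,0), (-1,0), (0,1), (0,-1)]

def pvBoxCells (m n : Int) : Finset (Int × Int) :=
  ((Finset.range m.toNat) ×ˢ (Finset.range n.toNat)).image (fun p => ((p.1 : Int), (p.2 : Int)))

lemma mem_pvBoxCells {m n : Int} {p : Int × Int} :
    p ∈ pvBoxCells m n ↔ 0 ≤ p.1 ∧ p.1 < m ∧ 0 ≤ p.2 ∧ p.2 < n := by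
  obtain ⟨r, c⟩ := p
  simp only [pvBoxCells, Finset.mem_image, Finset.mem_product, Finset.mem_range, Prod.exists,
    Prod.mk.injEq]
  constructor
  · rintro ⟨a, b, ⟨ha, hb⟩, rfl, rfl⟩; omega
  · rintro ⟨h1, h2, h3, h4⟩
    exact ⟨r.toNat, c.toNat, ⟨by omega, by omega⟩, by omega, by omega⟩

-- the body of A's inner `for dr, dc in …` loop; visited is the Python boolean matrix
-- represented as the set of coordinates marked True
def pvStep (grid : List (List Int)) (m n r c : Int)
    (st : Finset (Int × Int) × List (Int × Int) × Int × Int × Int × Int) (d : Int × Int) :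
    Finset (Int × Int) × List (Int × Int) × Int × Int × Int × Int :=
  match st with
  | (visited, q, minr, maxr, minc, maxc) =>
    let nr := r + d.1
    let nc := c + d.2
    if 0 ≤ nr ∧ nr < m ∧ 0 ≤ nc ∧ nc < n ∧ (nr, nc) ∉ visited ∧ pvAt grid nr nc = 1 then
      (insert (nr, nc) visited, q ++ [(nr, nc)], min minr nr, max maxr nr, min minc nc, max maxc nc)
    else
      (visited, q, minr, maxr, minc, maxc)

lemma pvStep_measure (grid : List (List Int)) (m n r c : Int)
    (st : Finset (Int × Int) × List (Int × Int) × Int × Int × Int × Int) (d : Int × Int) :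
    2 * (pvBoxCells m n \ (pvStep grid m n r c st d).1).card + (pvStep grid m n r c st d).2.1.length
      ≤ 2 * (pvBoxCells m n \ st.1).card + st.2.1.length := by
  obtain ⟨v, q, a, b, cc, dd⟩ := st
  simp only [pvStep]
  split
  · rename_i h
    have hmem : (r + d.1, c + d.2) ∈ pvBoxCells m n \ v := by
      rw [Finset.mem_sdiff, mem_pvBoxCells]
      exact ⟨⟨h.1, h.2.1, h.2.2.1, h.2.2.2.1⟩, h.2.2.2.2.1⟩
    have : pvBoxCells m n \ insert (r + d.1, c + d.2) v
        = (pvBoxCells m n \ v).erase (r + d.1, c + d.2) := by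
      ext p; simp [Finset.mem_sdiff, Finset.mem_erase]; tauto
    rw [this, Finset.card_erase_of_mem hmem]
    have hpos : 0 < (pvBoxCells m n \ v).card := Finset.card_pos.mpr ⟨_, hmem⟩
    simp only [List.length_append, List.length_cons, List.length_nil]
    omega
  · simp

-- A's `while q:` loop
def pvBfsLoop (grid : List (List Int)) (m n : Int) :
    Finset (Int × Int) → List (Int × Int) → Int → Int → Int → Int → Int × Finset (Int × Int)
  | visited, [], minr, maxr, minc, maxc => ((maxr - minr + 1) * (maxc - minc + 1), visited)
  | visited, (r, c) :: rest, minr, maxr, minc, maxc =>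
    let st := pvDirs.foldl (pvStep grid m n r c) (visited, rest, minr, maxr, minc, maxc)
    pvBfsLoop grid m n st.1 st.2.1 st.2.2.1 st.2.2.2.1 st.2.2.2.2.1 st.2.2.2.2.2
termination_by visited q _ _ _ _ => 2 * (pvBoxCells m n \ visited).card + q.length
decreasing_by
  simp only [pvDirs, List.foldl_cons, List.foldl_nil]
  have h1 := pvStep_measure grid m n r c (visited, rest, minr, maxr, minc, maxc) (1,0)
  have h2 := pvStep_measure grid m n r c (pvStep grid m n r c (visited, rest, minr, maxr, minc, maxc) (1,0)) (-1,0)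
  have h3 := pvStep_measure grid m n r c (pvStep grid m n r c (pvStep grid m n r c (visited, rest, minr, maxr, minc, maxc) (1,0)) (-1,0)) (0,1)
  have h4 := pvStep_measure grid m n r c (pvStep grid m n r c (pvStep grid m n r c (pvStep grid m n r c (visited, rest, minr, maxr, minc, maxc) (1,0)) (-1,0)) (0,1)) (0,-1)
  simp only [List.length_cons] at *
  omega

-- A's bfs(x, y): returns (area, updated visited)
def pvBfs (grid : List (List Int)) (m n : Int) (visited : Finset (Int × Int)) (x y : Int) :
    Int × Finset (Int × Int) :=
  pvBfsLoop grid m n (insert (x, y) visited) [(x, y)] x x y y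

def minSumRectangles (grid : List (List Int)) : Int :=
  let m : Int := grid.length
  let n : Int := (grid.headD []).length   -- Python grid[0]: raises on empty grid, excluded by Pre_
  let final :=
    (List.range m.toNat).foldl (fun st (i : Nat) =>
      (List.range n.toNat).foldl (fun st (j : Nat) =>
        if pvAt grid (i : Int) (j : Int) = 1 ∧ ((i : Int), (j : Int)) ∉ st.1 then
          let r := pvBfs grid m n st.1 i j
          (r.2, st.2 + r.1)
        else st) st) ((∅ : Finset (Int × Int)), (0 : Int))
  final.2

-- ===== PORT B =====

-- `for p in label: if label[p] == old: label[p] = new`  (values rewritten in place)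
def pvRelabel (lab : PySem.Dict (Int × Int) (Int × Int)) (old new : Int × Int) :
    PySem.Dict (Int × Int) (Int × Int) :=
  PySem.Dict.mk (lab.items.map (fun pv => (pv.1, if pv.2 = old then new else pv.2)))

-- `if t in label and label[t] != label[p]: …merge…`
def pvUnionEdge (lab : PySem.Dict (Int × Int) (Int × Int)) (p t : Int × Int) :
    PySem.Dict (Int × Int) (Int × Int) :=
  if lab.contains t then
    let old := lab.getD t (0, 0)
    let new := lab.getD p (0, 0)
    if old ≠ new then pvRelabel lab old new else lab
  else lab

def minSumRectangles_alt (grid : List (List Int)) : Int :=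
  let m : Int := grid.length
  let n : Int := (grid.headD []).length   -- Python grid[0]: raises on empty grid, excluded by Pre_
  let label0 :=
    (List.range m.toNat).foldl (fun d (i : Nat) =>
      (List.range n.toNat).foldl (fun d (j : Nat) =>
        if pvAt grid (i : Int) (j : Int) = 1 then d.insert ((i : Int), (j : Int)) ((i : Int), (j : Int)) else d) d)
      (PySem.Dict.empty : PySem.Dict (Int × Int) (Int × Int))
  let label :=
    (List.range m.toNat).foldl (fun d (i : Nat) =>
      (List.range n.toNat).foldl (fun d (j : Nat) =>
        if d.contains ((i : Int), (j : Int)) then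
          [((i : Int) + 1, (j : Int)), ((i : Int), (j : Int) + 1)].foldl
            (fun d t => pvUnionEdge d ((i : Int), (j : Int)) t) d
        else d) d) label0
  let boxes :=
    label.items.foldl (fun boxes pr =>
      match PySem.Dict.get? boxes pr.2 with
      | some b =>
          boxes.insert pr.2 (min b.1 pr.1.1, max b.2.1 pr.1.1, min b.2.2.1 pr.1.2, max b.2.2.2 pr.1.2)
      | none => boxes.insert pr.2 (pr.1.1, pr.1.1, pr.1.2, pr.1.2))
      (PySem.Dict.empty : PySem.Dict (Int × Int) (Int × Int × Int × Int))
  boxes.values.foldl (fun s b => s + (b.2.1 - b.1 + 1) * (b.2.2.2 - b.2.2.1 + 1)) 0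

-- ===== PRECONDITION & SPEC =====
-- Pre_ excludes exactly the inputs on which the Python A raises IndexError: the empty
-- grid (grid[0]) and grids with some row shorter than the first row (the full scan
-- reads grid[i][j] for every j < len(grid[0])).
def Pre_minSumRectangles (grid : List (List Int)) : Prop :=
  grid ≠ [] ∧ ∀ row ∈ grid, (grid.headD []).length ≤ row.length
instance (grid : List (List Int)) : Decidable (Pre_minSumRectangles grid) := by
  unfold Pre_minSumRectangles; infer_instance

def pvWitness_minSumRectangles : List (List Int) := [[1, 0], [1, 1]]

def Spec_minSumRectangles (grid : List (List Int)) (out : Int) : Prop := out = minSumRectangles_alt grid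
instance (grid : List (List Int)) (out : Int) : Decidable (Spec_minSumRectangles grid out) := by
  unfold Spec_minSumRectangles; infer_instance

-- ===== CLAIM (what is proved, stated in full; the proofs are below) =====
def Claim_equal_minSumRectangles : Prop := ∀ (grid : List (List Int)), Dom_minSumRectangles grid → Pre_minSumRectangles grid → Spec_minSumRectangles grid (minSumRectangles grid)

-- ===== LEMMAS AND PROOFS =====

-- ===== shared proof-side theory =====

def pvOnes (grid : List (List Int)) (m n : Int) : Finset (Int × Int) :=
  (pvBoxCells m n).filter (fun p => pvAt grid p.1 p.2 = 1)

def pvAdj (grid : List (List Int)) (m n : Int) (p q : Int × Int) : Prop :=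
  p ∈ pvOnes grid m n ∧ q ∈ pvOnes grid m n ∧
    ((p.1 = q.1 ∧ (q.2 = p.2 + 1 ∨ p.2 = q.2 + 1)) ∨
     (p.2 = q.2 ∧ (q.1 = p.1 + 1 ∨ p.1 = q.1 + 1)))

lemma pvAdj_symm (grid : List (List Int)) (m n : Int) : Symmetric (pvAdj grid m n) := by
  rintro p q ⟨h1, h2, h3⟩; exact ⟨h2, h1, by tauto⟩

noncomputable def pvComp (grid : List (List Int)) (m n : Int) (s : Int × Int) : Finset (Int × Int) := by
  classical
  exact (pvOnes grid m n).filter (fun q => Relation.ReflTransGen (pvAdj grid m n) s q)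

lemma mem_pvComp {grid : List (List Int)} {m n : Int} {s q : Int × Int} :
    q ∈ pvComp grid m n s ↔ q ∈ pvOnes grid m n ∧ Relation.ReflTransGen (pvAdj grid m n) s q := by
  classical
  simp [pvComp]

lemma pvComp_subset_ones {grid : List (List Int)} {m n : Int} {s : Int × Int} :
    pvComp grid m n s ⊆ pvOnes grid m n := fun q hq => (mem_pvComp.mp hq).1

lemma self_mem_pvComp {grid : List (List Int)} {m n : Int} {s : Int × Int}
    (hs : s ∈ pvOnes grid m n) : s ∈ pvComp grid m n s :=
  mem_pvComp.mpr ⟨hs, Relation.ReflTransGen.refl⟩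

lemma mem_pvComp_symm {grid : List (List Int)} {m n : Int} {s t : Int × Int}
    (hs : s ∈ pvOnes grid m n) (h : t ∈ pvComp grid m n s) : s ∈ pvComp grid m n t :=
  mem_pvComp.mpr ⟨hs, Relation.ReflTransGen.symmetric (pvAdj_symm grid m n) (mem_pvComp.mp h).2⟩

lemma pvComp_eq_of_mem {grid : List (List Int)} {m n : Int} {s t : Int × Int}
    (hs : s ∈ pvOnes grid m n) (h : t ∈ pvComp grid m n s) :
    pvComp grid m n t = pvComp grid m n s := by
  have hts := (mem_pvComp.mp h).2
  have hst := Relation.ReflTransGen.symmetric (pvAdj_symm grid m n) hts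
  ext q
  simp only [mem_pvComp]
  exact ⟨fun ⟨hq, hr⟩ => ⟨hq, hts.trans hr⟩, fun ⟨hq, hr⟩ => ⟨hq, hst.trans hr⟩⟩

lemma pvComp_mem_tail {grid : List (List Int)} {m n : Int} {s p t : Int × Int}
    (hp : p ∈ pvComp grid m n s) (h : pvAdj grid m n p t) : t ∈ pvComp grid m n s :=
  mem_pvComp.mpr ⟨h.2.1, (mem_pvComp.mp hp).2.tail h⟩

-- bounding-box quantities of a finite set of cells
def pvMinR (C : Finset (Int × Int)) : Int := WithTop.untopD 0 (C.image Prod.fst).min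
def pvMaxR (C : Finset (Int × Int)) : Int := WithBot.unbotD 0 (C.image Prod.fst).max
def pvMinC (C : Finset (Int × Int)) : Int := WithTop.untopD 0 (C.image Prod.snd).min
def pvMaxC (C : Finset (Int × Int)) : Int := WithBot.unbotD 0 (C.image Prod.snd).max

def pvArea (C : Finset (Int × Int)) : Int :=
  (pvMaxR C - pvMinR C + 1) * (pvMaxC C - pvMinC C + 1)

lemma pvMinR_singleton (p : Int × Int) : pvMinR {p} = p.1 := by simp [pvMinR]
lemma pvMaxR_singleton (p : Int × Int) : pvMaxR {p} = p.1 := by simp [pvMaxR]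
lemma pvMinC_singleton (p : Int × Int) : pvMinC {p} = p.2 := by simp [pvMinC]
lemma pvMaxC_singleton (p : Int × Int) : pvMaxC {p} = p.2 := by simp [pvMaxC]

lemma pvMinR_insert {C : Finset (Int × Int)} (h : C.Nonempty) (p : Int × Int) :
    pvMinR (insert p C) = min (pvMinR C) p.1 := by
  obtain ⟨a, ha⟩ := Finset.min_of_nonempty (h.image Prod.fst)
  rw [pvMinR, pvMinR, Finset.image_insert, Finset.min_insert, ha]
  rw [← WithTop.coe_min]
  exact min_comm p.1 a

lemma pvMaxR_insert {C : Finset (Int × Int)} (h : C.Nonempty) (p : Int × Int) :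
    pvMaxR (insert p C) = max (pvMaxR C) p.1 := by
  obtain ⟨a, ha⟩ := Finset.max_of_nonempty (h.image Prod.fst)
  rw [pvMaxR, pvMaxR, Finset.image_insert, Finset.max_insert, ha, ← WithBot.coe_max]
  exact max_comm p.1 a

lemma pvMinC_insert {C : Finset (Int × Int)} (h : C.Nonempty) (p : Int × Int) :
    pvMinC (insert p C) = min (pvMinC C) p.2 := by
  obtain ⟨a, ha⟩ := Finset.min_of_nonempty (h.image Prod.snd)
  rw [pvMinC, pvMinC, Finset.image_insert, Finset.min_insert, ha, ← WithTop.coe_min]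
  exact min_comm p.2 a

lemma pvMaxC_insert {C : Finset (Int × Int)} (h : C.Nonempty) (p : Int × Int) :
    pvMaxC (insert p C) = max (pvMaxC C) p.2 := by
  obtain ⟨a, ha⟩ := Finset.max_of_nonempty (h.image Prod.snd)
  rw [pvMaxC, pvMaxC, Finset.image_insert, Finset.max_insert, ha, ← WithBot.coe_max]
  exact max_comm p.2 a
-- ===== BFS (port A) correctness =====

lemma mem_pvOnes {grid : List (List Int)} {m n : Int} {p : Int × Int} :
    p ∈ pvOnes grid m n ↔ (0 ≤ p.1 ∧ p.1 < m ∧ 0 ≤ p.2 ∧ p.2 < n) ∧ pvAt grid p.1 p.2 = 1 := by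
  simp only [pvOnes, Finset.mem_filter, mem_pvBoxCells]

lemma pvAdj_shape {grid : List (List Int)} {m n : Int} {r c : Int} {t : Int × Int}
    (h : pvAdj grid m n (r, c) t) :
    t = (r + 1, c) ∨ t = (r - 1, c) ∨ t = (r, c + 1) ∨ t = (r, c - 1) := by
  obtain ⟨t1, t2⟩ := t
  obtain ⟨-, -, h⟩ := h
  simp only [Prod.mk.injEq]
  omega

lemma pvStep_inv (grid : List (List Int)) (m n : Int) (V : Finset (Int × Int)) (s : Int × Int)
    (hVclosed : ∀ p ∈ V, pvComp grid m n p ⊆ V) (hsV : s ∉ V) (hs : s ∈ pvOnes grid m n)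
    (r c : Int) (X : Finset (Int × Int)) (pend : List (Int × Int)) (d : Int × Int)
    (hd : d ∈ pvDirs) (hrc : (r, c) ∈ X) (hXc : X ⊆ pvComp grid m n s) (hsX : s ∈ X)
    (hpend : ∀ p ∈ pend, p ∈ X) :
    ∃ X' ex, pvStep grid m n r c (V ∪ X, pend, pvMinR X, pvMaxR X, pvMinC X, pvMaxC X) d
        = (V ∪ X', pend ++ ex, pvMinR X', pvMaxR X', pvMinC X', pvMaxC X') ∧
      X ⊆ X' ∧ X' ⊆ pvComp grid m n s ∧ (∀ p ∈ ex, p ∈ X') ∧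
      (∀ p ∈ X', p ∈ X ∨ p ∈ ex) ∧
      (pvAdj grid m n (r, c) (r + d.1, c + d.2) → (r + d.1, c + d.2) ∈ X') := by
  have hne : X.Nonempty := ⟨s, hsX⟩
  by_cases h : 0 ≤ r + d.1 ∧ r + d.1 < m ∧ 0 ≤ c + d.2 ∧ c + d.2 < n ∧
      (r + d.1, c + d.2) ∉ V ∪ X ∧ pvAt grid (r + d.1) (c + d.2) = 1
  · have hnbones : (r + d.1, c + d.2) ∈ pvOnes grid m n :=
      mem_pvOnes.mpr ⟨⟨h.1, h.2.1, h.2.2.1, h.2.2.2.1⟩, h.2.2.2.2.2⟩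
    have hrcones : (r, c) ∈ pvOnes grid m n := pvComp_subset_ones (hXc hrc)
    have hadj : pvAdj grid m n (r, c) (r + d.1, c + d.2) := by
      refine ⟨hrcones, hnbones, ?_⟩
      fin_cases hd <;> simp <;> omega
    have hnbcomp : (r + d.1, c + d.2) ∈ pvComp grid m n s := pvComp_mem_tail (hXc hrc) hadj
    refine ⟨insert (r + d.1, c + d.2) X, [(r + d.1, c + d.2)], ?_, ?_, ?_, ?_, ?_, ?_⟩
    · simp only [pvStep, if_pos h]
      rw [Finset.union_insert, pvMinR_insert hne, pvMaxR_insert hne,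
        pvMinC_insert hne, pvMaxC_insert hne]
    · exact Finset.subset_insert _ _
    · exact Finset.insert_subset hnbcomp hXc
    · intro p hp; simp at hp; simp [hp]
    · intro p hp; rcases Finset.mem_insert.mp hp with h' | h' <;> simp [h']
    · intro _; exact Finset.mem_insert_self _ _
  · refine ⟨X, [], ?_, Finset.Subset.refl _, hXc, by simp, fun p hp => Or.inl hp, ?_⟩
    · simp only [pvStep, if_neg h, List.append_nil]
    · intro hadj
      have hnbones := hadj.2.1
      have hb := mem_pvOnes.mp hnbones
      have hmem : (r + d.1, c + d.2) ∈ V ∪ X := by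
        by_contra hcon
        exact h ⟨hb.1.1, hb.1.2.1, hb.1.2.2.1, hb.1.2.2.2, hcon, hb.2⟩
      rcases Finset.mem_union.mp hmem with hV | hX
      · exfalso
        have hnbcomp : (r + d.1, c + d.2) ∈ pvComp grid m n s := pvComp_mem_tail (hXc hrc) hadj
        exact hsV (hVclosed _ hV (mem_pvComp_symm hs hnbcomp))
      · exact hX

lemma pvComp_subset_closed {grid : List (List Int)} {m n : Int} {s : Int × Int}
    {X : Finset (Int × Int)} (hsX : s ∈ X)
    (hclosed : ∀ p ∈ X, ∀ t, pvAdj grid m n p t → t ∈ X) :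
    pvComp grid m n s ⊆ X := by
  have key : ∀ q, Relation.ReflTransGen (pvAdj grid m n) s q → q ∈ X := by
    intro q hr
    induction hr with
    | refl => exact hsX
    | tail _ hadj ih => exact hclosed _ ih _ hadj
  exact fun q hq => key q (mem_pvComp.mp hq).2

lemma pvBfsLoop_spec (grid : List (List Int)) (m n : Int) (V : Finset (Int × Int)) (s : Int × Int)
    (hVclosed : ∀ p ∈ V, pvComp grid m n p ⊆ V) (hs : s ∈ pvOnes grid m n) (hsV : s ∉ V) :
    ∀ (k : Nat) (X : Finset (Int × Int)) (q : List (Int × Int)),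
      2 * (pvBoxCells m n \ (V ∪ X)).card + q.length ≤ k →
      s ∈ X → X ⊆ pvComp grid m n s → (∀ p ∈ q, p ∈ X) →
      (∀ p ∈ X, p ∉ q → ∀ t, pvAdj grid m n p t → t ∈ X) →
      pvBfsLoop grid m n (V ∪ X) q (pvMinR X) (pvMaxR X) (pvMinC X) (pvMaxC X)
        = (pvArea (pvComp grid m n s), V ∪ pvComp grid m n s) := by
  intro k
  induction k with
  | zero =>
    intro X q hk hsX hXc hq hfront
    match q with
    | [] =>
      have hXeq : X = pvComp grid m n s := by
        refine Finset.Subset.antisymm hXc (pvComp_subset_closed hsX ?_)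
        intro p hp t hadj
        exact hfront p hp (by simp) t hadj
      rw [pvBfsLoop]
      rw [hXeq]
      rfl
    | (r, c) :: rest => simp at hk
  | succ k ih =>
    intro X q hk hsX hXc hq hfront
    match q with
    | [] =>
      have hXeq : X = pvComp grid m n s := by
        refine Finset.Subset.antisymm hXc (pvComp_subset_closed hsX ?_)
        intro p hp t hadj
        exact hfront p hp (by simp) t hadj
      rw [pvBfsLoop]
      rw [hXeq]
      rfl
    | (r, c) :: rest =>
      have hrc : (r, c) ∈ X := hq _ (by simp)
      have hrest : ∀ p ∈ rest, p ∈ X := fun p hp => hq _ (by simp [hp])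
      -- apply the step lemma for each of the four directions in order
      obtain ⟨X1, e1, heq1, hs1, hc1, hex1, hcov1, hadj1⟩ :=
        pvStep_inv grid m n V s hVclosed hsV hs r c X rest (1, 0) (by simp [pvDirs])
          hrc hXc hsX hrest
      have hrc1 : (r, c) ∈ X1 := hs1 hrc
      have hsX1 : s ∈ X1 := hs1 hsX
      have hp1 : ∀ p ∈ rest ++ e1, p ∈ X1 := by
        intro p hp
        rcases List.mem_append.mp hp with h' | h'
        · exact hs1 (hrest _ h')
        · exact hex1 _ h'
      obtain ⟨X2, e2, heq2, hs2, hc2, hex2, hcov2, hadj2⟩ :=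
        pvStep_inv grid m n V s hVclosed hsV hs r c X1 (rest ++ e1) (-1, 0) (by simp [pvDirs])
          hrc1 hc1 hsX1 hp1
      have hrc2 : (r, c) ∈ X2 := hs2 hrc1
      have hsX2 : s ∈ X2 := hs2 hsX1
      have hp2 : ∀ p ∈ rest ++ e1 ++ e2, p ∈ X2 := by
        intro p hp
        rcases List.mem_append.mp hp with h' | h'
        · exact hs2 (hp1 _ h')
        · exact hex2 _ h'
      obtain ⟨X3, e3, heq3, hs3, hc3, hex3, hcov3, hadj3⟩ :=
        pvStep_inv grid m n V s hVclosed hsV hs r c X2 (rest ++ e1 ++ e2) (0, 1) (by simp [pvDirs])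
          hrc2 hc2 hsX2 hp2
      have hrc3 : (r, c) ∈ X3 := hs3 hrc2
      have hsX3 : s ∈ X3 := hs3 hsX2
      have hp3 : ∀ p ∈ rest ++ e1 ++ e2 ++ e3, p ∈ X3 := by
        intro p hp
        rcases List.mem_append.mp hp with h' | h'
        · exact hs3 (hp2 _ h')
        · exact hex3 _ h'
      obtain ⟨X4, e4, heq4, hs4, hc4, hex4, hcov4, hadj4⟩ :=
        pvStep_inv grid m n V s hVclosed hsV hs r c X3 (rest ++ e1 ++ e2 ++ e3) (0, -1)
          (by simp [pvDirs]) hrc3 hc3 hsX3 hp3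
      have hsX4 : s ∈ X4 := hs4 hsX3
      have hp4 : ∀ p ∈ rest ++ e1 ++ e2 ++ e3 ++ e4, p ∈ X4 := by
        intro p hp
        rcases List.mem_append.mp hp with h' | h'
        · exact hs4 (hp3 _ h')
        · exact hex4 _ h'
      -- the fold over the four directions
      have hfold : pvDirs.foldl (pvStep grid m n r c)
          (V ∪ X, rest, pvMinR X, pvMaxR X, pvMinC X, pvMaxC X)
          = (V ∪ X4, rest ++ e1 ++ e2 ++ e3 ++ e4,
             pvMinR X4, pvMaxR X4, pvMinC X4, pvMaxC X4) := by
        simp only [pvDirs, List.foldl_cons, List.foldl_nil]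
        rw [heq1, heq2, heq3, heq4]
      -- measure decreases
      have hmeas : 2 * (pvBoxCells m n \ (V ∪ X4)).card + (rest ++ e1 ++ e2 ++ e3 ++ e4).length ≤ k := by
        have m1 := pvStep_measure grid m n r c (V ∪ X, rest, pvMinR X, pvMaxR X, pvMinC X, pvMaxC X) (1, 0)
        rw [heq1] at m1
        have m2 := pvStep_measure grid m n r c (V ∪ X1, rest ++ e1, pvMinR X1, pvMaxR X1, pvMinC X1, pvMaxC X1) (-1, 0)
        rw [heq2] at m2
        have m3 := pvStep_measure grid m n r c (V ∪ X2, rest ++ e1 ++ e2, pvMinR X2, pvMaxR X2, pvMinC X2, pvMaxC X2) (0, 1)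
        rw [heq3] at m3
        have m4 := pvStep_measure grid m n r c (V ∪ X3, rest ++ e1 ++ e2 ++ e3, pvMinR X3, pvMaxR X3, pvMinC X3, pvMaxC X3) (0, -1)
        rw [heq4] at m4
        simp only [List.length_cons] at hk
        simp only at m1 m2 m3 m4 ⊢
        omega
      -- re-established invariant: frontier
      have hfront4 : ∀ p ∈ X4, p ∉ (rest ++ e1 ++ e2 ++ e3 ++ e4) →
          ∀ t, pvAdj grid m n p t → t ∈ X4 := by
        intro p hp hnp t hadj
        by_cases hpeq : p = (r, c)
        · subst hpeq
          rcases pvAdj_shape hadj with ht | ht | ht | ht <;> subst ht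
          · have h' := hadj1 (by simpa using hadj)
            simp only [add_zero] at h'
            exact hs4 (hs3 (hs2 h'))
          · have h' := hadj2 (by simpa using hadj)
            simp only [add_zero] at h'
            have h'' : (r - 1, c) = (r + -1, c) := by rw [sub_eq_add_neg]
            rw [h'']
            exact hs4 (hs3 h')
          · have h' := hadj3 (by simpa using hadj)
            simp only [add_zero] at h'
            exact hs4 h'
          · have h' := hadj4 (by simpa using hadj)
            simp only [add_zero] at h'
            have h'' : (r, c - 1) = (r, c + -1) := by rw [sub_eq_add_neg]
            rw [h'']
            exact h'
        · -- p is an older cell; show p ∈ X and p ∉ q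
          have hpX : p ∈ X := by
            rcases hcov4 _ hp with h' | h'
            · rcases hcov3 _ h' with h'' | h''
              · rcases hcov2 _ h'' with h3 | h3
                · rcases hcov1 _ h3 with h4 | h4
                  · exact h4
                  · exact absurd (by simp [h4] : p ∈ rest ++ e1 ++ e2 ++ e3 ++ e4) hnp
                · exact absurd (by simp [h3] : p ∈ rest ++ e1 ++ e2 ++ e3 ++ e4) hnp
              · exact absurd (by simp [h''] : p ∈ rest ++ e1 ++ e2 ++ e3 ++ e4) hnp
            · exact absurd (by simp [h'] : p ∈ rest ++ e1 ++ e2 ++ e3 ++ e4) hnp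
          have hnq : p ∉ (r, c) :: rest := by
            intro hcon
            rcases List.mem_cons.mp hcon with h' | h'
            · exact hpeq h'
            · exact hnp (by simp [h'])
          exact hs4 (hs3 (hs2 (hs1 (hfront p hpX hnq t hadj))))
      rw [pvBfsLoop]
      simp only [hfold]
      exact ih X4 (rest ++ e1 ++ e2 ++ e3 ++ e4) hmeas hsX4 hc4 hp4 hfront4

lemma pvBfs_spec (grid : List (List Int)) (m n : Int) (V : Finset (Int × Int)) (x y : Int)
    (hVclosed : ∀ p ∈ V, pvComp grid m n p ⊆ V) (hs : (x, y) ∈ pvOnes grid m n)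
    (hsV : (x, y) ∉ V) :
    pvBfs grid m n V x y
      = (pvArea (pvComp grid m n (x, y)), V ∪ pvComp grid m n (x, y)) := by
  have h0 : insert (x, y) V = V ∪ ({(x, y)} : Finset (Int × Int)) := by
    ext p; simp [or_comm]
  rw [pvBfs, h0]
  have hbb : (x : Int) = pvMinR {(x, y)} ∧ (x : Int) = pvMaxR {(x, y)} ∧
      (y : Int) = pvMinC {(x, y)} ∧ (y : Int) = pvMaxC {(x, y)} := by
    simp [pvMinR_singleton, pvMaxR_singleton, pvMinC_singleton, pvMaxC_singleton]
  rw [hbb.1, hbb.2.1, hbb.2.2.1, hbb.2.2.2]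
  exact pvBfsLoop_spec grid m n V (x, y) hVclosed hs hsV
    (2 * (pvBoxCells m n \ (V ∪ {(x, y)})).card + 1) {(x, y)} [(x, y)]
    (le_refl _) (by simp) (Finset.singleton_subset_iff.mpr (self_mem_pvComp hs))
    (by simp) (by intro p hp hnp; simp at hp; simp [hp] at hnp)
-- ===== outer scan of port A =====

def pvCellList (m n : Int) : List (Int × Int) :=
  (List.range m.toNat).flatMap (fun i : Nat => (List.range n.toNat).map (fun j : Nat => ((i : Int), (j : Int))))

def pvScanStep (grid : List (List Int)) (m n : Int)
    (st : Finset (Int × Int) × Int) (p : Int × Int) : Finset (Int × Int) × Int :=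
  if pvAt grid p.1 p.2 = 1 ∧ p ∉ st.1 then
    let r := pvBfs grid m n st.1 p.1 p.2
    (r.2, st.2 + r.1)
  else st

lemma minSumRectangles_eq_scan (grid : List (List Int)) :
    minSumRectangles grid
      = ((pvCellList (grid.length : Int) ((grid.headD []).length : Int)).foldl
          (pvScanStep grid (grid.length : Int) ((grid.headD []).length : Int)) (∅, 0)).2 := by
  simp only [minSumRectangles, pvCellList, List.foldl_flatMap, List.foldl_map, pvScanStep,
    Int.toNat_natCast]

lemma mem_pvCellList {m n : Int} {p : Int × Int} :
    p ∈ pvCellList m n ↔ 0 ≤ p.1 ∧ p.1 < m ∧ 0 ≤ p.2 ∧ p.2 < n := by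
  obtain ⟨r, c⟩ := p
  constructor
  · intro h
    obtain ⟨i, hi, h2⟩ := List.mem_flatMap.mp h
    obtain ⟨j, hj, h3⟩ := List.mem_map.mp h2
    rw [List.mem_range] at hi hj
    rw [Prod.ext_iff] at h3
    obtain ⟨h4, h5⟩ := h3
    simp only at h4 h5
    omega
  · rintro ⟨h1, h2, h3, h4⟩
    refine List.mem_flatMap.mpr ⟨r.toNat, List.mem_range.mpr (by omega),
      List.mem_map.mpr ⟨c.toNat, List.mem_range.mpr (by omega), ?_⟩⟩
    rw [Prod.ext_iff]
    constructor <;> simp <;> omega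

noncomputable def pvSeen (grid : List (List Int)) (m n : Int) (P : Finset (Int × Int)) :
    Finset (Int × Int) :=
  (P.filter (· ∈ pvOnes grid m n)).biUnion (pvComp grid m n)

noncomputable def pvPartial (grid : List (List Int)) (m n : Int) (P : Finset (Int × Int)) : Int :=
  ∑ C ∈ (P.filter (· ∈ pvOnes grid m n)).image (pvComp grid m n), pvArea C

lemma pvSeen_closed {grid : List (List Int)} {m n : Int} {P : Finset (Int × Int)} :
    ∀ q ∈ pvSeen grid m n P, pvComp grid m n q ⊆ pvSeen grid m n P := by
  intro q hq
  obtain ⟨s0, hs0, hqs0⟩ := Finset.mem_biUnion.mp hq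
  have hs0ones : s0 ∈ pvOnes grid m n := (Finset.mem_filter.mp hs0).2
  rw [pvComp_eq_of_mem hs0ones hqs0]
  exact Finset.subset_biUnion_of_mem _ hs0

lemma pvScan_inv (grid : List (List Int)) (m n : Int) :
    ∀ (cs : List (Int × Int)) (P : Finset (Int × Int)) (st : Finset (Int × Int) × Int),
      (∀ p ∈ cs, p ∈ pvBoxCells m n) →
      st.1 = pvSeen grid m n P → st.2 = pvPartial grid m n P →
      (cs.foldl (pvScanStep grid m n) st).1 = pvSeen grid m n (P ∪ cs.toFinset) ∧
      (cs.foldl (pvScanStep grid m n) st).2 = pvPartial grid m n (P ∪ cs.toFinset) := by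
  intro cs
  induction cs with
  | nil => intro P st _ h1 h2; simp [h1, h2]
  | cons p cs ih =>
    intro P st hbox h1 h2
    have hpbox : p ∈ pvBoxCells m n := hbox p (by simp)
    have hunion : insert p P ∪ cs.toFinset = P ∪ (p :: cs).toFinset := by
      ext q; simp
    have hstep : (pvScanStep grid m n st p).1 = pvSeen grid m n (insert p P) ∧
        (pvScanStep grid m n st p).2 = pvPartial grid m n (insert p P) := by
      by_cases hat : pvAt grid p.1 p.2 = 1
      · have hpones : p ∈ pvOnes grid m n := by
          rw [mem_pvOnes]; exact ⟨mem_pvBoxCells.mp hpbox, hat⟩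
        have hfilter : (insert p P).filter (· ∈ pvOnes grid m n)
            = insert p (P.filter (· ∈ pvOnes grid m n)) := by
          rw [Finset.filter_insert, if_pos hpones]
        by_cases hvis : p ∈ st.1
        · rw [pvScanStep, if_neg (by tauto)]
          rw [h1] at hvis
          obtain ⟨s0, hs0, hps0⟩ := Finset.mem_biUnion.mp hvis
          have hs0ones : s0 ∈ pvOnes grid m n := (Finset.mem_filter.mp hs0).2
          have hcompeq : pvComp grid m n p = pvComp grid m n s0 := pvComp_eq_of_mem hs0ones hps0
          constructor
          · rw [h1, pvSeen, pvSeen, hfilter, Finset.biUnion_insert, hcompeq,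
              Finset.union_eq_right.mpr (Finset.subset_biUnion_of_mem _ hs0)]
          · rw [h2, pvPartial, pvPartial, hfilter, Finset.image_insert, hcompeq,
              Finset.insert_eq_self.mpr (Finset.mem_image_of_mem _ hs0)]
        · rw [pvScanStep, if_pos ⟨hat, hvis⟩]
          have hVclosed : ∀ q ∈ st.1, pvComp grid m n q ⊆ st.1 := by
            rw [h1]; exact pvSeen_closed
          have hbfs := pvBfs_spec grid m n st.1 p.1 p.2 hVclosed (by simpa using hpones)
            (by simpa using hvis)
          simp only [hbfs]
          have hnotimg : pvComp grid m n p ∉ (P.filter (· ∈ pvOnes grid m n)).image (pvComp grid m n) := by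
            intro hcon
            obtain ⟨s0, hs0, hcompeq⟩ := Finset.mem_image.mp hcon
            have hs0ones : s0 ∈ pvOnes grid m n := (Finset.mem_filter.mp hs0).2
            apply hvis
            rw [h1]
            exact Finset.mem_biUnion.mpr ⟨s0, hs0, by
              rw [hcompeq]; exact self_mem_pvComp (by simpa using hpones)⟩
          constructor
          · rw [h1, pvSeen, pvSeen, hfilter, Finset.biUnion_insert]
            simp [Finset.union_comm, Prod.mk.eta]
          · rw [h2, pvPartial, pvPartial, hfilter, Finset.image_insert,
              Finset.sum_insert hnotimg]
            simp [add_comm, Prod.mk.eta]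
      · rw [pvScanStep, if_neg (by tauto)]
        have hpnotones : p ∉ pvOnes grid m n := fun hcon => hat (mem_pvOnes.mp hcon).2
        have hfilter : (insert p P).filter (· ∈ pvOnes grid m n)
            = P.filter (· ∈ pvOnes grid m n) := by
          rw [Finset.filter_insert, if_neg hpnotones]
        exact ⟨by rw [h1, pvSeen, pvSeen, hfilter], by rw [h2, pvPartial, pvPartial, hfilter]⟩
    have := ih (insert p P) (pvScanStep grid m n st p)
      (fun q hq => hbox q (by simp [hq])) hstep.1 hstep.2
    rw [hunion] at this
    simpa using this

noncomputable def pvRef (grid : List (List Int)) (m n : Int) : Int :=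
  ∑ C ∈ (pvOnes grid m n).image (pvComp grid m n), pvArea C

lemma pvCellList_toFinset {m n : Int} : (pvCellList m n).toFinset = pvBoxCells m n := by
  ext p; rw [List.mem_toFinset, mem_pvCellList, mem_pvBoxCells]

lemma minSumRectangles_eq_ref (grid : List (List Int)) :
    minSumRectangles grid = pvRef grid (grid.length : Int) ((grid.headD []).length : Int) := by
  set m : Int := (grid.length : Int)
  set n : Int := ((grid.headD []).length : Int)
  rw [minSumRectangles_eq_scan]
  have := (pvScan_inv grid m n (pvCellList m n) ∅ (∅, 0)
    (fun p hp => by rw [← pvCellList_toFinset]; simpa using hp)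
    (by simp [pvSeen]) (by simp [pvPartial])).2
  rw [this, pvPartial, pvCellList_toFinset]
  have hfe : (∅ ∪ pvBoxCells m n).filter (· ∈ pvOnes grid m n) = pvOnes grid m n := by
    ext p
    simp only [Finset.empty_union, Finset.mem_filter]
    exact ⟨fun h => h.2, fun h => ⟨(Finset.filter_subset _ _) h, h⟩⟩
  rw [hfe, pvRef]
-- ===== port B: reshaping the folds =====

def pvOnesList (grid : List (List Int)) (m n : Int) : List (Int × Int) :=
  (pvCellList m n).filter (fun p => decide (pvAt grid p.1 p.2 = 1))

def pvLabel0 (grid : List (List Int)) (m n : Int) : PySem.Dict (Int × Int) (Int × Int) :=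
  (pvCellList m n).foldl
    (fun d p => if pvAt grid p.1 p.2 = 1 then d.insert p p else d) PySem.Dict.empty

def pvEdgeStep (d : PySem.Dict (Int × Int) (Int × Int)) (p : Int × Int) :
    PySem.Dict (Int × Int) (Int × Int) :=
  if d.contains p then
    [(p.1 + 1, p.2), (p.1, p.2 + 1)].foldl (fun d t => pvUnionEdge d p t) d
  else d

def pvBoxesStep (boxes : PySem.Dict (Int × Int) (Int × Int × Int × Int))
    (pr : (Int × Int) × (Int × Int)) : PySem.Dict (Int × Int) (Int × Int × Int × Int) :=
  match PySem.Dict.get? boxes pr.2 with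
  | some b =>
      boxes.insert pr.2 (min b.1 pr.1.1, max b.2.1 pr.1.1, min b.2.2.1 pr.1.2, max b.2.2.2 pr.1.2)
  | none => boxes.insert pr.2 (pr.1.1, pr.1.1, pr.1.2, pr.1.2)

lemma minSumRectangles_alt_eq (grid : List (List Int)) :
    minSumRectangles_alt grid
      = (((((pvCellList (grid.length : Int) ((grid.headD []).length : Int)).foldl pvEdgeStep
            (pvLabel0 grid (grid.length : Int) ((grid.headD []).length : Int))).items.foldl
              pvBoxesStep PySem.Dict.empty).values).foldl
          (fun s b => s + (b.2.1 - b.1 + 1) * (b.2.2.2 - b.2.2.1 + 1)) 0) := by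
  simp only [minSumRectangles_alt, pvLabel0, pvEdgeStep, pvBoxesStep, pvCellList,
    List.foldl_flatMap, List.foldl_map, Int.toNat_natCast]
  rfl

lemma mem_pvOnesList {grid : List (List Int)} {m n : Int} {p : Int × Int} :
    p ∈ pvOnesList grid m n ↔ p ∈ pvOnes grid m n := by
  rw [pvOnesList, List.mem_filter, mem_pvCellList, mem_pvOnes, decide_eq_true_eq]

lemma pvCellList_nodup (m n : Int) : (pvCellList m n).Nodup := by
  apply List.nodup_flatMap.mpr
  constructor
  · intro i _
    refine List.Nodup.map ?_ List.nodup_range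
    intro a b h
    simpa using congrArg Prod.snd h
  · refine List.Pairwise.imp ?_ (List.pairwise_lt_range (n := m.toNat))
    intro a b hab
    intro x hx hy
    obtain ⟨j1, _, rfl⟩ := List.mem_map.mp hx
    obtain ⟨j2, _, h2⟩ := List.mem_map.mp hy
    have := congrArg Prod.fst h2
    simp at this
    omega

lemma pvOnesList_nodup (grid : List (List Int)) (m n : Int) : (pvOnesList grid m n).Nodup :=
  (pvCellList_nodup m n).filter _

-- the initial label dict is the identity association list over the scan-ordered 1-cells
lemma pvLabel0_items (grid : List (List Int)) (m n : Int) :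
    (pvLabel0 grid m n).items = (pvOnesList grid m n).map (fun p => (p, p)) := by
  rw [pvLabel0, pvOnesList]
  rw [show (fun d (p : Int × Int) => if pvAt grid p.1 p.2 = 1 then
      PySem.Dict.insert d p p else d)
    = (fun d p => if (fun q : Int × Int => decide (pvAt grid q.1 q.2 = 1)) p
        then PySem.Dict.insert d p p else d) from by
      funext d p; simp]
  rw [← List.foldl_filter]
  rw [PySem.Dict.items_foldl_insert_fresh]
  · simp [PySem.Dict.empty]
  · intro a _; simp [PySem.Dict.contains_empty]
  · simpa using pvOnesList_nodup grid m n
-- ===== connectivity by processed union edges =====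

lemma rtg_congr {α : Type} {r r' : α → α → Prop} (h : ∀ a b, r a b ↔ r' a b) {x y : α} :
    Relation.ReflTransGen r x y ↔ Relation.ReflTransGen r' x y :=
  ⟨Relation.ReflTransGen.mono (fun a b hab => (h a b).mp hab),
   Relation.ReflTransGen.mono (fun a b hab => (h a b).mpr hab)⟩

-- reflexive-transitive closure after adding one symmetric pair (p, t)
lemma rtg_add_pair {α : Type} (r : α → α → Prop) (p t : α) (x y : α) :
    Relation.ReflTransGen (fun a b => r a b ∨ (a = p ∧ b = t) ∨ (a = t ∧ b = p)) x y ↔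
      Relation.ReflTransGen r x y ∨
      (Relation.ReflTransGen r x p ∧ Relation.ReflTransGen r t y) ∨
      (Relation.ReflTransGen r x t ∧ Relation.ReflTransGen r p y) := by
  constructor
  · intro h
    induction h with
    | refl => exact Or.inl Relation.ReflTransGen.refl
    | tail _ hbc ih =>
      rename_i b c _
      rcases hbc with hr | ⟨rfl, rfl⟩ | ⟨rfl, rfl⟩
      · rcases ih with h1 | ⟨h1, h2⟩ | ⟨h1, h2⟩
        · exact Or.inl (h1.tail hr)
        · exact Or.inr (Or.inl ⟨h1, h2.tail hr⟩)
        · exact Or.inr (Or.inr ⟨h1, h2.tail hr⟩)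
      · rcases ih with h1 | ⟨h1, h2⟩ | ⟨h1, h2⟩
        · exact Or.inr (Or.inl ⟨h1, Relation.ReflTransGen.refl⟩)
        · exact Or.inr (Or.inl ⟨h1, Relation.ReflTransGen.refl⟩)
        · exact Or.inl h1
      · rcases ih with h1 | ⟨h1, h2⟩ | ⟨h1, h2⟩
        · exact Or.inr (Or.inr ⟨h1, Relation.ReflTransGen.refl⟩)
        · exact Or.inl h1
        · exact Or.inr (Or.inr ⟨h1, Relation.ReflTransGen.refl⟩)
  · have hmono : ∀ a b : α, Relation.ReflTransGen r a b →
        Relation.ReflTransGen (fun a b => r a b ∨ (a = p ∧ b = t) ∨ (a = t ∧ b = p)) a b :=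
      fun a b => Relation.ReflTransGen.mono (fun u v huv => Or.inl huv)
    have hpt : Relation.ReflTransGen
        (fun a b => r a b ∨ (a = p ∧ b = t) ∨ (a = t ∧ b = p)) p t :=
      Relation.ReflTransGen.single (Or.inr (Or.inl ⟨rfl, rfl⟩))
    have htp : Relation.ReflTransGen
        (fun a b => r a b ∨ (a = p ∧ b = t) ∨ (a = t ∧ b = p)) t p :=
      Relation.ReflTransGen.single (Or.inr (Or.inr ⟨rfl, rfl⟩))
    rintro (h1 | ⟨h1, h2⟩ | ⟨h1, h2⟩)
    · exact hmono _ _ h1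
    · exact ((hmono _ _ h1).trans hpt).trans (hmono _ _ h2)
    · exact ((hmono _ _ h1).trans htp).trans (hmono _ _ h2)

-- processed union edges: when a scanned 1-cell x is in S, the pairs to its
-- down/right 1-neighbours have been merged
def pvEdgeRel (grid : List (List Int)) (m n : Int) (S : Finset (Int × Int))
    (x y : Int × Int) : Prop :=
  x ∈ pvOnes grid m n ∧ y ∈ pvOnes grid m n ∧
    ((x ∈ S ∧ (y = (x.1 + 1, x.2) ∨ y = (x.1, x.2 + 1))) ∨
     (y ∈ S ∧ (x = (y.1 + 1, y.2) ∨ x = (y.1, y.2 + 1))))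

def pvConn (grid : List (List Int)) (m n : Int) (S : Finset (Int × Int)) :
    (Int × Int) → (Int × Int) → Prop :=
  Relation.ReflTransGen (pvEdgeRel grid m n S)

def pvJoin {α : Type} (R : α → α → Prop) (p t : α) : α → α → Prop :=
  fun x y => R x y ∨ (R x p ∧ R t y) ∨ (R x t ∧ R p y)

lemma pvConn_refl {grid : List (List Int)} {m n : Int} {S : Finset (Int × Int)} (x : Int × Int) :
    pvConn grid m n S x x := Relation.ReflTransGen.refl

lemma pvEdgeRel_symm {grid : List (List Int)} {m n : Int} {S : Finset (Int × Int)} :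
    Symmetric (pvEdgeRel grid m n S) := by
  rintro x y ⟨h1, h2, h3⟩; exact ⟨h2, h1, by tauto⟩

lemma pvConn_symm {grid : List (List Int)} {m n : Int} {S : Finset (Int × Int)} {x y : Int × Int}
    (h : pvConn grid m n S x y) : pvConn grid m n S y x :=
  Relation.ReflTransGen.symmetric pvEdgeRel_symm h

lemma pvConn_trans {grid : List (List Int)} {m n : Int} {S : Finset (Int × Int)} {x y z : Int × Int}
    (h1 : pvConn grid m n S x y) (h2 : pvConn grid m n S y z) : pvConn grid m n S x z :=
  h1.trans h2

-- scanning a 0-cell adds no edge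
lemma pvEdgeRel_insert_notones {grid : List (List Int)} {m n : Int} {S : Finset (Int × Int)}
    {p : Int × Int} (hp : p ∉ pvOnes grid m n) (a b : Int × Int) :
    pvEdgeRel grid m n (insert p S) a b ↔ pvEdgeRel grid m n S a b := by
  unfold pvEdgeRel
  constructor
  · rintro ⟨h1, h2, h3⟩
    refine ⟨h1, h2, ?_⟩
    rcases h3 with ⟨hm, hsh⟩ | ⟨hm, hsh⟩
    · rcases Finset.mem_insert.mp hm with rfl | hm'
      · exact absurd h1 hp
      · exact Or.inl ⟨hm', hsh⟩
    · rcases Finset.mem_insert.mp hm with rfl | hm'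
      · exact absurd h2 hp
      · exact Or.inr ⟨hm', hsh⟩
  · rintro ⟨h1, h2, h3⟩
    refine ⟨h1, h2, ?_⟩
    rcases h3 with ⟨hm, hsh⟩ | ⟨hm, hsh⟩
    · exact Or.inl ⟨Finset.mem_insert_of_mem hm, hsh⟩
    · exact Or.inr ⟨Finset.mem_insert_of_mem hm, hsh⟩

lemma pvConn_insert_notones {grid : List (List Int)} {m n : Int} {S : Finset (Int × Int)}
    {p : Int × Int} (hp : p ∉ pvOnes grid m n) (x y : Int × Int) :
    pvConn grid m n (insert p S) x y ↔ pvConn grid m n S x y :=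
  rtg_congr (pvEdgeRel_insert_notones hp)

-- scanning a 1-cell p adds exactly the pairs to its present down/right 1-neighbours
lemma pvEdgeRel_insert_char {grid : List (List Int)} {m n : Int} {S : Finset (Int × Int)}
    {p : Int × Int} (hp : p ∈ pvOnes grid m n) (hpS : p ∉ S) (a b : Int × Int) :
    pvEdgeRel grid m n (insert p S) a b ↔
      (fun a b => (fun a b => pvEdgeRel grid m n S a b ∨
          ((p.1 + 1, p.2) ∈ pvOnes grid m n ∧
            ((a = p ∧ b = (p.1 + 1, p.2)) ∨ (a = (p.1 + 1, p.2) ∧ b = p)))) a b ∨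
        ((p.1, p.2 + 1) ∈ pvOnes grid m n ∧
          ((a = p ∧ b = (p.1, p.2 + 1)) ∨ (a = (p.1, p.2 + 1) ∧ b = p)))) a b := by
  simp only
  unfold pvEdgeRel
  constructor
  · rintro ⟨h1, h2, h3⟩
    rcases h3 with ⟨hm, hsh⟩ | ⟨hm, hsh⟩
    · rcases Finset.mem_insert.mp hm with rfl | hm'
      · rcases hsh with rfl | rfl
        · exact Or.inl (Or.inr ⟨h2, Or.inl ⟨rfl, rfl⟩⟩)
        · exact Or.inr ⟨h2, Or.inl ⟨rfl, rfl⟩⟩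
      · exact Or.inl (Or.inl ⟨h1, h2, Or.inl ⟨hm', hsh⟩⟩)
    · rcases Finset.mem_insert.mp hm with rfl | hm'
      · rcases hsh with rfl | rfl
        · exact Or.inl (Or.inr ⟨h1, Or.inr ⟨rfl, rfl⟩⟩)
        · exact Or.inr ⟨h1, Or.inr ⟨rfl, rfl⟩⟩
      · exact Or.inl (Or.inl ⟨h1, h2, Or.inr ⟨hm', hsh⟩⟩)
  · rintro ((⟨h1, h2, h3⟩ | ⟨hnb, (⟨rfl, rfl⟩ | ⟨rfl, rfl⟩)⟩) | ⟨hnb, (⟨rfl, rfl⟩ | ⟨rfl, rfl⟩)⟩)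
    · refine ⟨h1, h2, ?_⟩
      rcases h3 with ⟨hm, hsh⟩ | ⟨hm, hsh⟩
      · exact Or.inl ⟨Finset.mem_insert_of_mem hm, hsh⟩
      · exact Or.inr ⟨Finset.mem_insert_of_mem hm, hsh⟩
    · exact ⟨hp, hnb, Or.inl ⟨Finset.mem_insert_self _ _, Or.inl rfl⟩⟩
    · exact ⟨hnb, hp, Or.inr ⟨Finset.mem_insert_self _ _, Or.inl rfl⟩⟩
    · exact ⟨hp, hnb, Or.inl ⟨Finset.mem_insert_self _ _, Or.inr rfl⟩⟩
    · exact ⟨hnb, hp, Or.inr ⟨Finset.mem_insert_self _ _, Or.inr rfl⟩⟩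

-- one conditional pair added to an RTG: the join formula, or nothing
lemma rtg_cond_pair {α : Type} (r : α → α → Prop) (p t : α) (cond : Prop) [Decidable cond]
    (x y : α) :
    Relation.ReflTransGen (fun a b => r a b ∨ (cond ∧ ((a = p ∧ b = t) ∨ (a = t ∧ b = p)))) x y ↔
      (if cond then pvJoin (Relation.ReflTransGen r) p t x y
       else Relation.ReflTransGen r x y) := by
  by_cases hc : cond
  · rw [if_pos hc]
    rw [rtg_congr (r' := fun a b => r a b ∨ (a = p ∧ b = t) ∨ (a = t ∧ b = p))
      (by intro a b; simp [hc])]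
    exact rtg_add_pair r p t x y
  · rw [if_neg hc]
    exact rtg_congr (by intro a b; simp [hc])

def pvR1 (grid : List (List Int)) (m n : Int) (S : Finset (Int × Int)) (p : Int × Int) :
    (Int × Int) → (Int × Int) → Prop := fun x y =>
  if (p.1 + 1, p.2) ∈ pvOnes grid m n then
    pvJoin (pvConn grid m n S) p (p.1 + 1, p.2) x y
  else pvConn grid m n S x y

def pvR2 (grid : List (List Int)) (m n : Int) (S : Finset (Int × Int)) (p : Int × Int) :
    (Int × Int) → (Int × Int) → Prop := fun x y =>
  if (p.1, p.2 + 1) ∈ pvOnes grid m n then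
    pvJoin (pvR1 grid m n S p) p (p.1, p.2 + 1) x y
  else pvR1 grid m n S p x y

lemma pvConn_insert_char {grid : List (List Int)} {m n : Int} {S : Finset (Int × Int)}
    {p : Int × Int} (hp : p ∈ pvOnes grid m n) (hpS : p ∉ S) (x y : Int × Int) :
    pvConn grid m n (insert p S) x y ↔ pvR2 grid m n S p x y := by
  rw [pvConn, rtg_congr (pvEdgeRel_insert_char hp hpS), rtg_cond_pair]
  have h1 : ∀ a b, Relation.ReflTransGen (fun a b => pvEdgeRel grid m n S a b ∨
      ((p.1 + 1, p.2) ∈ pvOnes grid m n ∧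
        ((a = p ∧ b = (p.1 + 1, p.2)) ∨ (a = (p.1 + 1, p.2) ∧ b = p)))) a b ↔
      pvR1 grid m n S p a b :=
    fun a b => rtg_cond_pair _ _ _ _ a b
  rw [pvR2]
  by_cases hrp : (p.1, p.2 + 1) ∈ pvOnes grid m n
  · rw [if_pos hrp, if_pos hrp]
    unfold pvJoin
    simp only [h1]
  · rw [if_neg hrp, if_neg hrp]
    exact h1 x y

-- the fully processed edge set gives exactly 4-adjacency connectivity
lemma pvEdgeRel_box {grid : List (List Int)} {m n : Int} (a b : Int × Int) :
    pvEdgeRel grid m n (pvBoxCells m n) a b ↔ pvAdj grid m n a b := by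
  unfold pvEdgeRel pvAdj
  constructor
  · rintro ⟨h1, h2, h3⟩
    refine ⟨h1, h2, ?_⟩
    obtain ⟨a1, a2⟩ := a
    obtain ⟨b1, b2⟩ := b
    rcases h3 with ⟨-, h4 | h4⟩ | ⟨-, h4 | h4⟩ <;>
      (rw [Prod.ext_iff] at h4; simp only [Prod.mk.injEq] at ⊢ h4 <;> omega)
  · rintro ⟨h1, h2, h3⟩
    refine ⟨h1, h2, ?_⟩
    obtain ⟨a1, a2⟩ := a
    obtain ⟨b1, b2⟩ := b
    have ha : (a1, a2) ∈ pvBoxCells m n := (Finset.mem_filter.mp h1).1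
    have hb : (b1, b2) ∈ pvBoxCells m n := (Finset.mem_filter.mp h2).1
    simp only [Prod.mk.injEq] at h3 ⊢
    rcases h3 with ⟨rfl, h4 | h4⟩ | ⟨rfl, h4 | h4⟩
    · exact Or.inl ⟨ha, Or.inr ⟨by omega, by omega⟩⟩
    · exact Or.inr ⟨hb, Or.inr ⟨by omega, by omega⟩⟩
    · exact Or.inl ⟨ha, Or.inl ⟨by omega, by omega⟩⟩
    · exact Or.inr ⟨hb, Or.inl ⟨by omega, by omega⟩⟩

lemma pvConn_box_iff_reach {grid : List (List Int)} {m n : Int} (x y : Int × Int) :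
    pvConn grid m n (pvBoxCells m n) x y ↔ Relation.ReflTransGen (pvAdj grid m n) x y :=
  rtg_congr pvEdgeRel_box
-- ===== the label dict as a labelling function over the 1-cells =====

def pvDictOf (grid : List (List Int)) (m n : Int) (f : (Int × Int) → (Int × Int)) :
    PySem.Dict (Int × Int) (Int × Int) :=
  PySem.Dict.mk ((pvOnesList grid m n).map (fun p => (p, f p)))

lemma pvDictOf_keys (grid : List (List Int)) (m n : Int) (f : (Int × Int) → (Int × Int)) :
    (pvDictOf grid m n f).keys = pvOnesList grid m n := by
  simp [pvDictOf, PySem.Dict.keys, Function.comp_def]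

lemma pvDictOf_keys_nodup (grid : List (List Int)) (m n : Int) (f : (Int × Int) → (Int × Int)) :
    (pvDictOf grid m n f).keys.Nodup := by
  rw [pvDictOf_keys]; exact pvOnesList_nodup grid m n

lemma pvDictOf_contains {grid : List (List Int)} {m n : Int} {f : (Int × Int) → (Int × Int)}
    {q : Int × Int} : (pvDictOf grid m n f).contains q = true ↔ q ∈ pvOnes grid m n := by
  rw [PySem.Dict.contains_iff_mem_keys, pvDictOf_keys, mem_pvOnesList]

lemma pvDictOf_getD {grid : List (List Int)} {m n : Int} {f : (Int × Int) → (Int × Int)}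
    {q : Int × Int} (hq : q ∈ pvOnes grid m n) :
    (pvDictOf grid m n f).getD q (0, 0) = f q := by
  have hmem : (q, f q) ∈ (pvDictOf grid m n f).items := by
    simp only [pvDictOf, PySem.Dict.items]
    exact List.mem_map_of_mem (mem_pvOnesList.mpr hq)
  exact PySem.Dict.getD_of_mem_items _ hmem (pvDictOf_keys_nodup grid m n f) _

lemma pvRelabel_dictOf (grid : List (List Int)) (m n : Int) (f : (Int × Int) → (Int × Int))
    (old new : Int × Int) :
    pvRelabel (pvDictOf grid m n f) old new
      = pvDictOf grid m n (fun q => if f q = old then new else f q) := by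
  simp [pvRelabel, pvDictOf, List.map_map, Function.comp_def]

def GoodLab (grid : List (List Int)) (m n : Int) (f : (Int × Int) → (Int × Int))
    (R : (Int × Int) → (Int × Int) → Prop) : Prop :=
  ∀ x ∈ pvOnes grid m n, ∀ y ∈ pvOnes grid m n, (f x = f y ↔ R x y)

def EqvOn (R : (Int × Int) → (Int × Int) → Prop) : Prop :=
  (∀ x y, R x y → R y x) ∧ (∀ x y z, R x y → R y z → R x z) ∧ (∀ x, R x x)

lemma pvConn_eqv (grid : List (List Int)) (m n : Int) (S : Finset (Int × Int)) :
    EqvOn (pvConn grid m n S) :=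
  ⟨fun _ _ h => pvConn_symm h, fun _ _ _ h1 h2 => pvConn_trans h1 h2, fun _ => pvConn_refl _⟩

lemma pvJoin_eqv {R : (Int × Int) → (Int × Int) → Prop} (hR : EqvOn R) (p t : Int × Int) :
    EqvOn (pvJoin R p t) := by
  obtain ⟨hsym, htrans, hrefl⟩ := hR
  refine ⟨?_, ?_, fun x => Or.inl (hrefl x)⟩
  · rintro x y (h | ⟨h1, h2⟩ | ⟨h1, h2⟩)
    · exact Or.inl (hsym _ _ h)
    · exact Or.inr (Or.inr ⟨hsym _ _ h2, hsym _ _ h1⟩)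
    · exact Or.inr (Or.inl ⟨hsym _ _ h2, hsym _ _ h1⟩)
  · rintro x y z (h | ⟨h1, h2⟩ | ⟨h1, h2⟩) (h' | ⟨h1', h2'⟩ | ⟨h1', h2'⟩)
    · exact Or.inl (htrans _ _ _ h h')
    · exact Or.inr (Or.inl ⟨htrans _ _ _ h h1', h2'⟩)
    · exact Or.inr (Or.inr ⟨htrans _ _ _ h h1', h2'⟩)
    · exact Or.inr (Or.inl ⟨h1, htrans _ _ _ h2 h'⟩)
    · exact Or.inr (Or.inl ⟨h1, h2'⟩)
    · exact Or.inl (htrans _ _ _ h1 h2')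
    · exact Or.inr (Or.inr ⟨h1, htrans _ _ _ h2 h'⟩)
    · exact Or.inl (htrans _ _ _ h1 h2')
    · exact Or.inr (Or.inr ⟨h1, h2'⟩)

def pvJoinC (grid : List (List Int)) (m n : Int) (R : (Int × Int) → (Int × Int) → Prop)
    (p t : Int × Int) : (Int × Int) → (Int × Int) → Prop := fun x y =>
  if t ∈ pvOnes grid m n then pvJoin R p t x y else R x y

lemma pvJoinC_eqv {grid : List (List Int)} {m n : Int}
    {R : (Int × Int) → (Int × Int) → Prop} (hR : EqvOn R) (p t : Int × Int) :
    EqvOn (pvJoinC grid m n R p t) := by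
  unfold pvJoinC
  by_cases ht : t ∈ pvOnes grid m n
  · simp only [if_pos ht]
    exact pvJoin_eqv hR p t
  · simp only [if_neg ht]
    exact hR

lemma ite_label_eq {old new a b : Int × Int} (hne : old ≠ new) :
    ((if a = old then new else a) = (if b = old then new else b)) ↔
      (a = b ∨ (a = old ∧ b = new) ∨ (a = new ∧ b = old)) := by
  by_cases h1 : a = old
  · by_cases h2 : b = old
    · simp [h1, h2]
    · rw [if_pos h1, if_neg h2]
      constructor
      · intro h; exact Or.inr (Or.inl ⟨h1, h.symm⟩)
      · rintro (h | ⟨-, h⟩ | ⟨-, hbold⟩)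
        · exact absurd (h.symm.trans h1) h2
        · exact h.symm
        · exact absurd hbold h2
  · by_cases h2 : b = old
    · rw [if_neg h1, if_pos h2]
      constructor
      · intro h; exact Or.inr (Or.inr ⟨h, h2⟩)
      · rintro (h | ⟨ha, -⟩ | ⟨ha, -⟩)
        · exact absurd (h.trans h2) h1
        · exact absurd ha h1
        · exact ha
    · rw [if_neg h1, if_neg h2]
      constructor
      · intro h; exact Or.inl h
      · rintro (h | ⟨ha, -⟩ | ⟨-, hb⟩)
        · exact h
        · exact absurd ha h1
        · exact absurd hb h2

lemma pvUnionEdge_good {grid : List (List Int)} {m n : Int}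
    {f : (Int × Int) → (Int × Int)} {R : (Int × Int) → (Int × Int) → Prop}
    (hR : EqvOn R) (hGood : GoodLab grid m n f R) {p : Int × Int} (hp : p ∈ pvOnes grid m n)
    (t : Int × Int) :
    ∃ f', pvUnionEdge (pvDictOf grid m n f) p t = pvDictOf grid m n f' ∧
      GoodLab grid m n f' (pvJoinC grid m n R p t) := by
  unfold GoodLab pvJoinC
  obtain ⟨hsym, htrans, hrefl⟩ := hR
  by_cases ht : t ∈ pvOnes grid m n
  · have hcont : (pvDictOf grid m n f).contains t = true := pvDictOf_contains.mpr ht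
    rw [pvUnionEdge, if_pos hcont]
    simp only [pvDictOf_getD ht, pvDictOf_getD hp]
    by_cases hne : f t ≠ f p
    · rw [if_pos hne, pvRelabel_dictOf]
      refine ⟨_, rfl, ?_⟩
      intro x hx y hy
      rw [ite_label_eq hne]
      rw [if_pos ht]
      rw [hGood x hx y hy, hGood x hx t ht, hGood y hy p hp, hGood x hx p hp, hGood y hy t ht]
      unfold pvJoin
      constructor
      · rintro (h | ⟨h1, h2⟩ | ⟨h1, h2⟩)
        · exact Or.inl h
        · exact Or.inr (Or.inr ⟨h1, hsym _ _ h2⟩)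
        · exact Or.inr (Or.inl ⟨h1, hsym _ _ h2⟩)
      · rintro (h | ⟨h1, h2⟩ | ⟨h1, h2⟩)
        · exact Or.inl h
        · exact Or.inr (Or.inr ⟨h1, hsym _ _ h2⟩)
        · exact Or.inr (Or.inl ⟨h1, hsym _ _ h2⟩)
    · rw [if_neg hne]
      push_neg at hne
      have hRpt : R p t := (hGood p hp t ht).mp hne.symm
      refine ⟨f, rfl, ?_⟩
      intro x hx y hy
      rw [hGood x hx y hy, if_pos ht]
      unfold pvJoin
      constructor
      · exact fun h => Or.inl h
      · rintro (h | ⟨h1, h2⟩ | ⟨h1, h2⟩)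
        · exact h
        · exact htrans _ _ _ h1 (htrans _ _ _ hRpt h2)
        · exact htrans _ _ _ h1 (htrans _ _ _ (hsym _ _ hRpt) h2)
  · have hcont : ¬ ((pvDictOf grid m n f).contains t = true) :=
      fun hcon => ht (pvDictOf_contains.mp hcon)
    rw [pvUnionEdge, if_neg hcont]
    refine ⟨f, rfl, ?_⟩
    intro x hx y hy
    rw [hGood x hx y hy, if_neg ht]
-- ===== processing the whole scan of union edges =====

lemma pvEdgeStep_good {grid : List (List Int)} {m n : Int} {S : Finset (Int × Int)}
    {f : (Int × Int) → (Int × Int)} (hGood : GoodLab grid m n f (pvConn grid m n S))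
    {p : Int × Int} (hpS : p ∉ S) :
    ∃ f', pvEdgeStep (pvDictOf grid m n f) p = pvDictOf grid m n f' ∧
      GoodLab grid m n f' (pvConn grid m n (insert p S)) := by
  by_cases hp : p ∈ pvOnes grid m n
  · have hcont : (pvDictOf grid m n f).contains p = true := pvDictOf_contains.mpr hp
    rw [pvEdgeStep, if_pos hcont]
    obtain ⟨f1, he1, hg1⟩ :=
      pvUnionEdge_good (pvConn_eqv grid m n S) hGood hp (p.1 + 1, p.2)
    obtain ⟨f2, he2, hg2⟩ :=
      pvUnionEdge_good (pvJoinC_eqv (pvConn_eqv grid m n S) p (p.1 + 1, p.2)) hg1 hp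
        (p.1, p.2 + 1)
    refine ⟨f2, ?_, ?_⟩
    · simp only [List.foldl_cons, List.foldl_nil, he1, he2]
    · intro x hx y hy
      rw [hg2 x hx y hy]
      exact (pvConn_insert_char hp hpS x y).symm
  · have hcont : ¬ ((pvDictOf grid m n f).contains p = true) :=
      fun hcon => hp (pvDictOf_contains.mp hcon)
    rw [pvEdgeStep, if_neg hcont]
    refine ⟨f, rfl, ?_⟩
    intro x hx y hy
    rw [hGood x hx y hy]
    exact (pvConn_insert_notones hp x y).symm

lemma pvEdgeFold_good {grid : List (List Int)} {m n : Int} :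
    ∀ (cs : List (Int × Int)) (S : Finset (Int × Int)) (f : (Int × Int) → (Int × Int)),
      (∀ p ∈ cs, p ∉ S) → cs.Nodup → GoodLab grid m n f (pvConn grid m n S) →
      ∃ f', cs.foldl pvEdgeStep (pvDictOf grid m n f) = pvDictOf grid m n f' ∧
        GoodLab grid m n f' (pvConn grid m n (S ∪ cs.toFinset)) := by
  intro cs
  induction cs with
  | nil => exact fun S f _ _ hGood => ⟨f, rfl, by simpa using hGood⟩
  | cons p cs ih =>
    intro S f hdisj hnodup hGood
    obtain ⟨f1, he1, hg1⟩ := pvEdgeStep_good hGood (hdisj p (by simp))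
    have hdisj' : ∀ q ∈ cs, q ∉ insert p S := by
      intro q hq
      rw [Finset.mem_insert]
      rintro (rfl | hqS)
      · exact (List.nodup_cons.mp hnodup).1 hq
      · exact hdisj q (by simp [hq]) hqS
    obtain ⟨f2, he2, hg2⟩ := ih (insert p S) f1 hdisj' (List.nodup_cons.mp hnodup).2 hg1
    refine ⟨f2, by rw [List.foldl_cons, he1, he2], ?_⟩
    have : insert p S ∪ cs.toFinset = S ∪ (p :: cs).toFinset := by
      ext q; simp
    rwa [this] at hg2

lemma pvConn_empty {grid : List (List Int)} {m n : Int} {x y : Int × Int} :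
    pvConn grid m n (∅ : Finset (Int × Int)) x y ↔ x = y := by
  constructor
  · intro h
    induction h with
    | refl => rfl
    | tail _ hbc ih =>
      obtain ⟨-, -, ⟨h, -⟩ | ⟨h, -⟩⟩ := hbc <;> exact absurd h (Finset.notMem_empty _)
  · rintro rfl; exact pvConn_refl _

lemma pvLabel0_eq_dictOf (grid : List (List Int)) (m n : Int) :
    pvLabel0 grid m n = pvDictOf grid m n id := by
  apply PySem.Dict.ext
  rw [pvLabel0_items]
  simp [pvDictOf]

lemma pvLabelFinal (grid : List (List Int)) (m n : Int) :
    ∃ f, (pvCellList m n).foldl pvEdgeStep (pvLabel0 grid m n) = pvDictOf grid m n f ∧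
      ∀ x ∈ pvOnes grid m n, ∀ y ∈ pvOnes grid m n,
        (f x = f y ↔ Relation.ReflTransGen (pvAdj grid m n) x y) := by
  have hGood0 : GoodLab grid m n id (pvConn grid m n (∅ : Finset (Int × Int))) := by
    intro x _ y _
    simpa [id] using pvConn_empty.symm
  obtain ⟨f, hf, hg⟩ := pvEdgeFold_good (pvCellList m n) ∅ id (by simp)
    (pvCellList_nodup m n) hGood0
  refine ⟨f, by rwa [pvLabel0_eq_dictOf], ?_⟩
  intro x hx y hy
  rw [hg x hx y hy]
  rw [show (∅ : Finset (Int × Int)) ∪ (pvCellList m n).toFinset = pvBoxCells m n from by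
    rw [Finset.empty_union, pvCellList_toFinset]]
  exact pvConn_box_iff_reach x y
-- ===== grouping the labels into bounding boxes =====

def pvTupleArea (b : Int × Int × Int × Int) : Int :=
  (b.2.1 - b.1 + 1) * (b.2.2.2 - b.2.2.1 + 1)

lemma pvBoxesStep_insert (boxes : PySem.Dict (Int × Int) (Int × Int × Int × Int))
    (pr : (Int × Int) × (Int × Int)) :
    pvBoxesStep boxes pr = boxes.insert pr.2
      (match PySem.Dict.get? boxes pr.2 with
       | some b => (min b.1 pr.1.1, max b.2.1 pr.1.1, min b.2.2.1 pr.1.2, max b.2.2.2 pr.1.2)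
       | none => (pr.1.1, pr.1.1, pr.1.2, pr.1.2)) := by
  rw [pvBoxesStep]
  match h : PySem.Dict.get? boxes pr.2 with
  | some b => simp
  | none => simp

lemma pvBoxes_keys_nodup (f : (Int × Int) → (Int × Int)) (l : List (Int × Int)) :
    ((l.map (fun p => (p, f p))).foldl pvBoxesStep PySem.Dict.empty).keys.Nodup := by
  rw [show pvBoxesStep = (fun (d : PySem.Dict (Int × Int) (Int × Int × Int × Int)) pr =>
      d.insert ((fun pr : (Int × Int) × (Int × Int) => pr.2) pr)
        ((fun (d : PySem.Dict (Int × Int) (Int × Int × Int × Int))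
            (pr : (Int × Int) × (Int × Int)) =>
          (match PySem.Dict.get? d pr.2 with
           | some b => (min b.1 pr.1.1, max b.2.1 pr.1.1, min b.2.2.1 pr.1.2, max b.2.2.2 pr.1.2)
           | none => (pr.1.1, pr.1.1, pr.1.2, pr.1.2))) d pr)) from by
    funext d pr; exact pvBoxesStep_insert d pr]
  exact PySem.Dict.nodup_keys_foldl_insert_key _ _ _ _ PySem.Dict.nodup_keys_empty

lemma pvBoxes_get? (f : (Int × Int) → (Int × Int)) (l : List (Int × Int)) (r : Int × Int) :
    ((l.map (fun p => (p, f p))).foldl pvBoxesStep PySem.Dict.empty).get? r =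
      (if (l.filter (fun q => decide (f q = r))) = [] then none
       else some (pvMinR (l.filter (fun q => decide (f q = r))).toFinset,
                  pvMaxR (l.filter (fun q => decide (f q = r))).toFinset,
                  pvMinC (l.filter (fun q => decide (f q = r))).toFinset,
                  pvMaxC (l.filter (fun q => decide (f q = r))).toFinset)) := by
  induction l using List.reverseRecOn with
  | nil => simp [PySem.Dict.get?_empty]
  | append_singleton l q ih =>
    rw [List.map_append, List.foldl_append, List.map_cons, List.map_nil, List.foldl_cons,
      List.foldl_nil, pvBoxesStep_insert]
    simp only [List.filter_append, List.filter_cons, List.filter_nil]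
    by_cases hr : f q = r
    · subst hr
      rw [PySem.Dict.get?_insert_self]
      rw [show (if decide (f q = f q) = true then [q] else ([] : List (Int × Int))) = [q]
        from by simp]
      rw [ih]
      by_cases hl : (List.filter (fun x => decide (f x = f q)) l) = []
      · rw [if_pos hl, hl]
        simp [pvMinR_singleton, pvMaxR_singleton, pvMinC_singleton, pvMaxC_singleton]
      · rw [if_neg hl]
        have hne : (List.filter (fun x => decide (f x = f q)) l).toFinset.Nonempty := by
          obtain ⟨x, hx⟩ := List.exists_mem_of_ne_nil _ hl
          exact ⟨x, List.mem_toFinset.mpr hx⟩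
        have htf : (List.filter (fun x => decide (f x = f q)) l ++ [q]).toFinset
            = insert q (List.filter (fun x => decide (f x = f q)) l).toFinset := by
          ext x; simp [or_comm]
        rw [if_neg (by simp), htf]
        rw [pvMinR_insert hne, pvMaxR_insert hne, pvMinC_insert hne, pvMaxC_insert hne]
    · rw [PySem.Dict.get?_insert_of_ne _ _ (show r ≠ f q from fun hcon => hr hcon.symm)]
      rw [show (if decide (f q = r) = true then [q] else ([] : List (Int × Int))) = []
        from by simp [hr]]
      rw [List.append_nil]
      exact ih
-- ===== port B computes the same component-wise sum =====

lemma minSumRectangles_alt_eq_ref (grid : List (List Int)) :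
    minSumRectangles_alt grid = pvRef grid (grid.length : Int) ((grid.headD []).length : Int) := by
  set m : Int := (grid.length : Int) with hm
  set n : Int := ((grid.headD []).length : Int) with hn
  obtain ⟨f, hf, hg⟩ := pvLabelFinal grid m n
  rw [minSumRectangles_alt_eq, hf]
  have hitems : (pvDictOf grid m n f).items = (pvOnesList grid m n).map (fun p => (p, f p)) := rfl
  rw [hitems]
  have hnd := pvBoxes_keys_nodup f (pvOnesList grid m n)
  rw [PySem.Dict.values_eq_map_keys _ hnd (0, 0, 0, 0)]
  rw [PySem.List.foldl_add, zero_add,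
    List.map_map]
  rw [← List.sum_toFinset _ hnd]
  have hkeys : ((pvOnesList grid m n).map (fun p => (p, f p)) |>.foldl pvBoxesStep
      PySem.Dict.empty).keys.toFinset = (pvOnes grid m n).image f := by
    ext r
    rw [List.mem_toFinset, Finset.mem_image]
    constructor
    · intro hmem
      have hne : ¬ (((pvOnesList grid m n).map (fun p => (p, f p))).foldl pvBoxesStep
          PySem.Dict.empty).get? r = none := by
        rw [PySem.Dict.get?_eq_none_iff_not_mem_keys]
        simpa using hmem
      rw [pvBoxes_get? f] at hne
      by_cases hfil : (List.filter (fun x => decide (f x = r)) (pvOnesList grid m n)) = []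
      · exact absurd (if_pos hfil) hne
      · obtain ⟨x, hx⟩ := List.exists_mem_of_ne_nil _ hfil
        rw [List.mem_filter] at hx
        exact ⟨x, mem_pvOnesList.mp hx.1, by simpa using hx.2⟩
    · rintro ⟨q, hq, rfl⟩
      have hne : ¬ (List.filter (fun x => decide (f x = f q)) (pvOnesList grid m n)) = [] := by
        intro hcon
        have := List.filter_eq_nil_iff.mp hcon q (mem_pvOnesList.mpr hq)
        simp at this
      have : ¬ (((pvOnesList grid m n).map (fun p => (p, f p))).foldl pvBoxesStep
          PySem.Dict.empty).get? (f q) = none := by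
        rw [pvBoxes_get? f, if_neg hne]
        simp
      rw [PySem.Dict.get?_eq_none_iff_not_mem_keys, not_not] at this
      exact this
  rw [hkeys, pvRef]
  -- the classes of the final labelling are exactly the components
  have hclass : ∀ p ∈ pvOnes grid m n,
      ((pvOnesList grid m n).filter (fun x => decide (f x = f p))).toFinset
        = pvComp grid m n p := by
    intro p hp
    ext q
    rw [List.mem_toFinset, List.mem_filter, mem_pvComp, mem_pvOnesList]
    constructor
    · rintro ⟨hq, hfq⟩
      refine ⟨hq, ?_⟩
      rw [decide_eq_true_eq] at hfq
      exact (hg p hp q hq).mp hfq.symm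
    · rintro ⟨hq, hr⟩
      exact ⟨hq, by rw [decide_eq_true_eq]; exact ((hg p hp q hq).mpr hr).symm⟩
  refine Finset.sum_bij
    (fun r _ => ((pvOnesList grid m n).filter (fun x => decide (f x = r))).toFinset) ?_ ?_ ?_ ?_
  · rintro r hr
    obtain ⟨p, hp, rfl⟩ := Finset.mem_image.mp hr
    dsimp only
    rw [hclass p hp]
    exact Finset.mem_image_of_mem _ hp
  · rintro r1 hr1 r2 hr2 heq
    obtain ⟨p1, hp1, rfl⟩ := Finset.mem_image.mp hr1
    dsimp only at heq
    have hp1mem : p1 ∈ ((pvOnesList grid m n).filter (fun x => decide (f x = f p1))).toFinset := by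
      rw [List.mem_toFinset, List.mem_filter]
      exact ⟨mem_pvOnesList.mpr hp1, by simp⟩
    rw [heq] at hp1mem
    rw [List.mem_toFinset, List.mem_filter, decide_eq_true_eq] at hp1mem
    exact hp1mem.2
  · rintro C hC
    obtain ⟨p, hp, rfl⟩ := Finset.mem_image.mp hC
    exact ⟨f p, Finset.mem_image_of_mem _ hp, hclass p hp⟩
  · rintro r hr
    obtain ⟨p, hp, rfl⟩ := Finset.mem_image.mp hr
    dsimp only [Function.comp_apply]
    -- value of the boxes dict at a present label is the bounding box of its class
    have hne : ¬ (List.filter (fun x => decide (f x = f p)) (pvOnesList grid m n)) = [] := by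
      intro hcon
      have := List.filter_eq_nil_iff.mp hcon p (mem_pvOnesList.mpr hp)
      simp at this
    have hget : (((pvOnesList grid m n).map (fun p => (p, f p))).foldl pvBoxesStep
        PySem.Dict.empty).get? (f p)
        = some (pvMinR ((pvOnesList grid m n).filter (fun x => decide (f x = f p))).toFinset,
                pvMaxR ((pvOnesList grid m n).filter (fun x => decide (f x = f p))).toFinset,
                pvMinC ((pvOnesList grid m n).filter (fun x => decide (f x = f p))).toFinset,
                pvMaxC ((pvOnesList grid m n).filter (fun x => decide (f x = f p))).toFinset) := by
      rw [pvBoxes_get? f, if_neg hne]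
    rw [PySem.Dict.getD_of_get?_eq_some _ _ hget]
    rfl

-- ===== VERDICT (by name: the statement is the Claim_ definition above) =====
theorem minSumRectangles_spec : Claim_equal_minSumRectangles := by
  intro grid _ _
  unfold Spec_minSumRectangles
  rw [minSumRectangles_eq_ref, minSumRectangles_alt_eq_ref]
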